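-- pv_equiv track=rewrite | github.com/Happzy-WHU/extact_json | main.py | splitListByScore
-- ===== SOURCE A (Python) =====
-- def getJsonType(d):
--     if "scores" in d or "lastScores" in d:
--         return "scores"
--     if "[user](#message)" in d.values():
--         return "user"
--     if "[assistant](#message)" in d.values():
--         return "assistant"
--
-- def splitListByScore(source_data):
--     result = []
--     tmp = []
--     for item in source_data:
--         if getJsonType(item) != "scores":
--             tmp.append(item)
--         elif tmp:
--             tmp.append(item)
--             result.append(tmp)
--             tmp = []
--     if tmp:
--         result.append(tmp)
--     return result
-- ===== SOURCE B (Python) =====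
-- from itertools import groupby
--
-- def getJsonType(d):
--     if "scores" in d or "lastScores" in d:
--         return "scores"
--     if "[user](#message)" in d.values():
--         return "user"
--     if "[assistant](#message)" in d.values():
--         return "assistant"
--
-- def splitListByScore(source_data):
--     runs = [(k, list(g)) for k, g in groupby(source_data, key=lambda x: getJsonType(x) == "scores")]
--     result = []
--     for i, (is_scores, run) in enumerate(runs):
--         if not is_scores:
--             if i + 1 < len(runs):
--                 result.append(run + [runs[i + 1][1][0]])
--             else:
--                 result.append(run)
--     return result
-- ===== Notes on version B (the rewrite author's own statement) =====
-- stated objective: alternative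
-- what changed: B replaces A's single stateful pass (pending-buffer accumulator flushed at score markers) with an itertools.groupby decomposition: split into maximal runs by scores-ness, then pair each non-scores run with the head of the following scores run.
import Mathlib
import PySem

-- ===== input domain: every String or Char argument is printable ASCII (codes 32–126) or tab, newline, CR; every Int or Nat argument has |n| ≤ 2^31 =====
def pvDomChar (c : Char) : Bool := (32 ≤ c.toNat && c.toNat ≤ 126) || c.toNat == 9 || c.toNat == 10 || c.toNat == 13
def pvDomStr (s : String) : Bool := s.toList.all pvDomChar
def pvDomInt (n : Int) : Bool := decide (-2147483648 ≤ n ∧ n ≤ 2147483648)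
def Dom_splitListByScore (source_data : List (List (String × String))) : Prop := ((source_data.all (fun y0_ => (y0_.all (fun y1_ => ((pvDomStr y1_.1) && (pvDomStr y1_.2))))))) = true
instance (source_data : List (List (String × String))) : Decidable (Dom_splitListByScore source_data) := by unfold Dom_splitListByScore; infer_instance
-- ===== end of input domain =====

-- B groups the sequence into maximal runs of same "scores"-ness and pairs each
-- non-scores run with the first element of the following scores run (objective:
-- alternative decomposition, same cost).

-- ===== PORT A =====
def getJsonType (d : List (String × String)) : Option String :=
  if (d.map Prod.fst).contains "scores" || (d.map Prod.fst).contains "lastScores" then some "scores"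
  else if (d.map Prod.snd).contains "[user](#message)" then some "user"
  else if (d.map Prod.snd).contains "[assistant](#message)" then some "assistant"
  else none

def stepA (st : List (List (List (String × String))) × List (List (String × String)))
    (item : List (String × String)) : List (List (List (String × String))) × List (List (String × String)) :=
  if getJsonType item ≠ some "scores" then (st.1, st.2 ++ [item])
  else if st.2 ≠ [] then (st.1 ++ [st.2 ++ [item]], [])
  else st

def splitListByScore (source_data : List (List (String × String))) : List (List (List (String × String))) :=
  let st := source_data.foldl stepA ([], [])
  if st.2 ≠ [] then st.1 ++ [st.2] else st.1

-- ===== PORT B =====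
def isScores (d : List (String × String)) : Bool := getJsonType d == some "scores"

-- port of itertools.groupby with key `isScores`: maximal runs of equal key
def pyGroupRuns : List (List (String × String)) → List (List (List (String × String)))
  | [] => []
  | x :: xs =>
    match pyGroupRuns xs with
    | [] => [[x]]
    | r :: rest =>
      match r with
      | [] => [x] :: rest
      | y :: _ => if isScores x == isScores y then (x :: r) :: rest else [x] :: r :: rest

-- walk the runs: emit each non-scores run extended by the head of the next (scores) run
def walkRuns : List (List (List (String × String))) → List (List (List (String × String)))
  | [] => []
  | r :: rest =>
    match r with
    | [] => walkRuns rest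
    | x :: _ =>
      if isScores x then walkRuns rest
      else match rest with
        | [] => [r]
        | s :: _ => (r ++ s.take 1) :: walkRuns rest

def splitListByScore_alt (source_data : List (List (String × String))) : List (List (List (String × String))) :=
  walkRuns (pyGroupRuns source_data)

-- ===== PRECONDITION & SPEC =====
def Spec_splitListByScore (source_data : List (List (String × String))) (out : List (List (List (String × String)))) : Prop := out = splitListByScore_alt source_data
instance (source_data : List (List (String × String))) (out : List (List (List (String × String)))) : Decidable (Spec_splitListByScore source_data out) := by unfold Spec_splitListByScore; infer_instance

-- ===== CLAIM (what is proved, stated in full; the proofs are below) =====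
def Claim_equal_splitListByScore : Prop := ∀ (source_data : List (List (String × String))), Dom_splitListByScore source_data → Spec_splitListByScore source_data (splitListByScore source_data)

-- ===== LEMMAS AND PROOFS =====

-- A's loop without the `result` accumulator
def goA (tmp : List (List (String × String))) : List (List (String × String)) → List (List (List (String × String)))
  | [] => if tmp = [] then [] else [tmp]
  | item :: xs =>
    if isScores item = false then goA (tmp ++ [item]) xs
    else if tmp ≠ [] then (tmp ++ [item]) :: goA [] xs
    else goA tmp xs

-- prepend a pending non-scores partial run onto the run list
def consRun (tmp : List (List (String × String))) (runs : List (List (List (String × String)))) : List (List (List (String × String))) :=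
  match tmp with
  | [] => runs
  | _ =>
    match runs with
    | [] => [tmp]
    | r :: rest =>
      match r with
      | [] => tmp :: rest
      | y :: _ => if isScores y then tmp :: r :: rest else (tmp ++ r) :: rest

lemma pyGroupRuns_ne_nil : ∀ xs r, r ∈ pyGroupRuns xs → r ≠ [] := by
  intro xs
  induction xs with
  | nil => simp [pyGroupRuns]
  | cons x xs ih =>
    intro r hr
    simp only [pyGroupRuns] at hr
    rcases h : pyGroupRuns xs with _ | ⟨s, rest⟩
    · rw [h] at hr; simp only [List.mem_singleton] at hr; simp [hr]
    · rw [h] at hr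
      dsimp only at hr
      rcases s with _ | ⟨y, s'⟩
      · exact absurd rfl (ih [] (by rw [h]; exact List.mem_cons_self))
      · dsimp only at hr
        by_cases hk : (isScores x == isScores y) = true
        · rw [if_pos hk] at hr
          rcases List.mem_cons.mp hr with hr | hr
          · simp [hr]
          · exact ih r (by rw [h]; exact List.mem_cons_of_mem _ hr)
        · rw [if_neg hk] at hr
          rcases List.mem_cons.mp hr with hr | hr
          · simp [hr]
          · exact ih r (by rw [h]; exact hr)

lemma foldl_acc (xs : List (List (String × String))) :
    ∀ rs tmp,
      (let st := xs.foldl stepA (rs, tmp)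
       if st.2 ≠ [] then st.1 ++ [st.2] else st.1) = rs ++ goA tmp xs := by
  induction xs with
  | nil =>
    intro rs tmp
    simp only [List.foldl, goA]
    by_cases h : tmp = [] <;> simp [h]
  | cons x xs ih =>
    intro rs tmp
    rw [List.foldl_cons]
    by_cases h : getJsonType x = some "scores"
    · have hs : isScores x = true := by simp [isScores, h]
      by_cases ht : tmp = []
      · rw [show stepA (rs, tmp) x = (rs, tmp) from by simp [stepA, h, ht]]
        rw [show goA tmp (x :: xs) = goA tmp xs from by simp [goA, hs, ht]]
        exact ih rs tmp
      · rw [show stepA (rs, tmp) x = (rs ++ [tmp ++ [x]], []) from by simp [stepA, h, ht]]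
        rw [show goA tmp (x :: xs) = (tmp ++ [x]) :: goA [] xs from by simp [goA, hs, ht]]
        rw [ih (rs ++ [tmp ++ [x]]) []]
        simp
    · have hs : isScores x = false := by
        cases hc : isScores x
        · rfl
        · exact absurd (by simpa [isScores] using hc) h
      rw [show stepA (rs, tmp) x = (rs, tmp ++ [x]) from by simp [stepA, h]]
      rw [show goA tmp (x :: xs) = goA (tmp ++ [x]) xs from by simp [goA, hs]]
      exact ih rs (tmp ++ [x])

lemma goA_eq_walk (xs : List (List (String × String))) :
    ∀ tmp, (∀ y ∈ tmp, isScores y = false) →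
      goA tmp xs = walkRuns (consRun tmp (pyGroupRuns xs)) := by
  induction xs with
  | nil =>
    intro tmp htmp
    rcases tmp with _ | ⟨t, tmp'⟩
    · simp [goA, consRun, pyGroupRuns, walkRuns]
    · have : isScores t = false := htmp t (by simp)
      simp [goA, consRun, pyGroupRuns, walkRuns, this]
  | cons x xs ih =>
    intro tmp htmp
    by_cases hx : isScores x = false
    · -- x is non-scores: tmp grows
      have step : goA tmp (x :: xs) = goA (tmp ++ [x]) xs := by simp [goA, hx]
      have htmp' : ∀ y ∈ tmp ++ [x], isScores y = false := by
        intro y hy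
        rcases List.mem_append.mp hy with h | h
        · exact htmp y h
        · simpa [List.mem_singleton.mp h] using hx
      rw [step, ih (tmp ++ [x]) htmp']
      -- show the run lists walked are equal
      congr 1
      simp only [pyGroupRuns]
      rcases hg : pyGroupRuns xs with _ | ⟨r, rest⟩
      · rcases tmp with _ | ⟨t, tmp'⟩ <;> simp [consRun, hx]
      · have hrne : r ≠ [] := fun h0 => pyGroupRuns_ne_nil xs r (by rw [hg]; exact List.mem_cons_self) h0
        rcases r with _ | ⟨y, r'⟩
        · exact absurd rfl hrne
        · by_cases hy : isScores y = false
          · -- merge x into r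
            have hk : (isScores x == isScores y) = true := by simp [hx, hy]
            simp only [hk, if_pos]
            rcases tmp with _ | ⟨t, tmp'⟩ <;> simp [consRun, hx, hy]
          · have hy' : isScores y = true := by revert hy; cases isScores y <;> simp
            have hk : (isScores x == isScores y) = false := by simp [hx, hy']
            simp only [hk]
            simp only [Bool.false_eq_true, if_false]
            rcases tmp with _ | ⟨t, tmp'⟩ <;> simp [consRun, hx, hy']
    · -- x is scores
      have hx' : isScores x = true := by revert hx; cases isScores x <;> simp
      rcases tmp with _ | ⟨t, tmp'⟩
      · -- tmp empty: item dropped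
        have step : goA [] (x :: xs) = goA [] xs := by simp [goA, hx']
        rw [step, ih [] (by simp)]
        simp only [consRun, pyGroupRuns]
        rcases hg : pyGroupRuns xs with _ | ⟨r, rest⟩
        · simp [walkRuns, hx']
        · have hrne : r ≠ [] := fun h0 => pyGroupRuns_ne_nil xs r (by rw [hg]; exact List.mem_cons_self) h0
          rcases r with _ | ⟨y, r'⟩
          · exact absurd rfl hrne
          · by_cases hy : isScores y = true
            · have : (isScores x == isScores y) = true := by simp [hx', hy]
              simp [walkRuns, hx', hy]
            · have hy' : isScores y = false := by revert hy; cases isScores y <;> simp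
              simp [walkRuns, hx', hy']
      · -- tmp nonempty: flush
        have ht : isScores t = false := htmp t (by simp)
        have step : goA (t :: tmp') (x :: xs) = ((t :: tmp') ++ [x]) :: goA [] xs := by
          simp [goA, hx']
        rw [step, ih [] (by simp)]
        simp only [consRun, pyGroupRuns]
        rcases hg : pyGroupRuns xs with _ | ⟨r, rest⟩
        · simp [walkRuns, hx', ht]
        · have hrne : r ≠ [] := fun h0 => pyGroupRuns_ne_nil xs r (by rw [hg]; exact List.mem_cons_self) h0
          rcases r with _ | ⟨y, r'⟩
          · exact absurd rfl hrne
          · by_cases hy : isScores y = true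
            · have : (isScores x == isScores y) = true := by simp [hx', hy]
              simp [walkRuns, hx', ht, hy]
            · have hy' : isScores y = false := by revert hy; cases isScores y <;> simp
              simp [walkRuns, hx', ht, hy']

-- ===== VERDICT (by name: the statement is the Claim_ definition above) =====
theorem splitListByScore_spec : Claim_equal_splitListByScore := by
  intro source_data _
  show splitListByScore source_data = splitListByScore_alt source_data
  have h1 := foldl_acc source_data [] []
  have h2 := goA_eq_walk source_data [] (by simp)
  simp only [splitListByScore]
  rw [h1, h2]
  simp [splitListByScore_alt, consRun]
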